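-- pv_equiv track=rewrite | github.com/stalj/pp1 | 04-Subroutines/zadanie49.py | f
-- ===== SOURCE A (Python) =====
-- def f(dice):
--     count_dice = {}
--     for i in dice:
--         if i in count_dice:
--             count_dice[i]+=1
--         else:
--             count_dice[i] = 1
--     for i, count in count_dice.items():
--         if count == max(count_dice.values()):
--             return i
-- ===== SOURCE B (Python) =====
-- def f(dice):
--     best = None
--     best_count = 0
--     for x in dice:
--         c = dice.count(x)
--         if c > best_count:
--             best = x
--             best_count = c
--     return best
-- ===== Notes on version B (the rewrite author's own statement) =====
-- stated objective: simpler
-- what changed: Replaces the frequency dictionary and the second scan (recomputing max(values) each iteration) with a single pass over the list keeping the running best element and its count via list.count, strict comparison preserving first-on-tie.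
import Mathlib
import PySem

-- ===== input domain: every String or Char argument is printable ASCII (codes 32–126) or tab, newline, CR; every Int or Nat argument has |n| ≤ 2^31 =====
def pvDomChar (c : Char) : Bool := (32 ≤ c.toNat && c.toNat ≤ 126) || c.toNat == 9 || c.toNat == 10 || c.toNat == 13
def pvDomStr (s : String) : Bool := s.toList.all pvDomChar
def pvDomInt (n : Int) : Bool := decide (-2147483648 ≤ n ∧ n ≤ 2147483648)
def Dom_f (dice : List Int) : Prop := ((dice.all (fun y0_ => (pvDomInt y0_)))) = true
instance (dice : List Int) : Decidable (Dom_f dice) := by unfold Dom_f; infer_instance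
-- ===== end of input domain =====

-- B drops A's frequency dict and second scan for a single pass keeping the running best
-- element and its dice.count (strict >, so the first most-frequent value wins) — simpler.

-- ===== PORT A =====
-- the dict-building loop of A
def fDict (dice : List Int) : PySem.Dict Int Int :=
  dice.foldl
    (fun d i => if d.contains i then d.modify i 0 (· + 1) else d.insert i 1)
    PySem.Dict.empty

-- the 'for i, count in count_dice.items(): if count == max(count_dice.values()): return i' loop
def fScan (vals : List Int) : List (Int × Int) → Option Int
  | [] => none
  | (i, c) :: rest =>
    if some c = PySem.List.max? vals id then some i else fScan vals rest

def f (dice : List Int) : Option Int :=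
  fScan (fDict dice).values (fDict dice).items

-- ===== PORT B =====
def f_alt (dice : List Int) : Option Int :=
  (dice.foldl
    (fun st x =>
      let c : Int := (dice.count x : Int)
      if st.2 < c then (some x, c) else st)
    ((none : Option Int), (0 : Int))).1

-- ===== PRECONDITION & SPEC =====
def Spec_f (dice : List Int) (out : Option Int) : Prop := out = f_alt dice
instance (dice : List Int) (out : Option Int) : Decidable (Spec_f dice out) := by unfold Spec_f; infer_instance

-- ===== CLAIM (what is proved, stated in full; the proofs are below) =====
def Claim_equal_f : Prop := ∀ (dice : List Int), Dom_f dice → Spec_f dice (f dice)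

-- ===== LEMMAS AND PROOFS =====

-- A's dict-building step is exactly the Counter step
lemma fDict_eq_counter (dice : List Int) : fDict dice = PySem.Dict.counter dice := by
  have hstep : ∀ (d : PySem.Dict Int Int) (i : Int),
      (if d.contains i then d.modify i 0 (· + 1) else d.insert i 1) = d.modify i 0 (· + 1) := by
    intro d i
    by_cases h : d.contains i = true
    · simp [h]
    · have h0 : d.getD i 0 = 0 :=
        PySem.Dict.getD_of_not_contains d 0 (by simpa using h)
      simp [h, PySem.Dict.modify, h0]
  unfold fDict
  simp only [hstep]
  rw [PySem.Dict.counter_eq_foldl]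

-- find? sees through ordered dedup: first match in the dedup is the first match in the list
lemma find?_ofList (p : Int → Bool) (xs : List Int) :
    (PySem.Set.ofList xs : List Int).find? p = xs.find? p := by
  induction xs using List.reverseRecOn with
  | nil => rfl
  | append_singleton l x ih =>
    have hof : PySem.Set.ofList (l ++ [x]) = PySem.Set.add (PySem.Set.ofList l) x := by
      simp [PySem.Set.ofList, List.foldl_append]
    rw [hof, List.find?_append]
    unfold PySem.Set.add
    by_cases hc : (PySem.Set.ofList l).contains x = true
    · have hx : x ∈ l := (PySem.Set.mem_ofList l x).mp ((PySem.Set.contains_iff _ x).mp hc)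
      rw [if_pos hc, ih]
      cases hfind : l.find? p with
      | some a => simp
      | none =>
        have hnp : ¬ p x = true := List.find?_eq_none.mp hfind x hx
        simp [List.find?, hnp]
    · rw [if_neg hc, List.find?_append, ih]

-- the items loop of A is a find? over the keys
lemma fScan_map (vals : List Int) (g : Int → Int) (l : List Int) :
    fScan vals (l.map (fun k => (k, g k))) =
      l.find? (fun k => decide (some (g k) = PySem.List.max? vals id)) := by
  induction l with
  | nil => rfl
  | cons a t ih =>
    by_cases h : some (g a) = PySem.List.max? vals id <;>
      simp [fScan, List.find?, h, ih]

-- invariant of B's single pass: the final count bounds every count, is attained, and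
-- the final best is the first element attaining it
lemma foldB_inv (g : Int → Int) (p : List Int) (hpos : ∀ x ∈ p, 0 < g x)
    (r : Option Int × Int)
    (hr : r = p.foldl (fun st x => if st.2 < g x then (some x, g x) else st)
        ((none : Option Int), (0 : Int))) :
    (∀ y ∈ p, g y ≤ r.2) ∧
    r.1 = p.find? (fun y => decide (g y = r.2)) ∧
    (r.2 = 0 ∨ ∃ y ∈ p, g y = r.2) := by
  induction p using List.reverseRecOn generalizing r with
  | nil => subst hr; exact ⟨by simp, by simp, Or.inl rfl⟩
  | append_singleton l x ih =>
    have hposl : ∀ y ∈ l, 0 < g y := fun y hy => hpos y (by simp [hy])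
    have hposx : 0 < g x := hpos x (by simp)
    obtain ⟨hb, hf, ha⟩ := ih hposl
      (l.foldl (fun st x => if st.2 < g x then (some x, g x) else st)
        ((none : Option Int), (0 : Int))) rfl
    set r0 := l.foldl (fun st x => if st.2 < g x then (some x, g x) else st)
        ((none : Option Int), (0 : Int)) with hr0
    rw [List.foldl_append] at hr
    simp only [List.foldl_cons, List.foldl_nil, ← hr0] at hr
    by_cases hlt : r0.2 < g x
    · rw [if_pos hlt] at hr
      subst hr
      refine ⟨?_, ?_, Or.inr ⟨x, by simp, rfl⟩⟩
      · intro y hy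
        rcases (List.mem_append.mp hy) with h | h
        · exact le_of_lt (lt_of_le_of_lt (hb y h) hlt)
        · simp_all
      · rw [List.find?_append]
        have hnone : l.find? (fun y => decide (g y = g x)) = none := by
          apply List.find?_eq_none.mpr
          intro y hy
          simp only [decide_eq_true_eq]
          exact fun he => absurd hlt (by rw [← he] at hlt ⊢; exact not_lt.mpr (hb y hy))
        simp [hnone, List.find?]
    · rw [if_neg hlt] at hr
      subst hr
      have hx2 : g x ≤ r0.2 := not_lt.mp hlt
      have hr2pos : 0 < r0.2 := lt_of_lt_of_le hposx hx2
      have hatt : ∃ y ∈ l, g y = r0.2 := by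
        rcases ha with h0 | h
        · omega
        · exact h
      refine ⟨?_, ?_, Or.inr ?_⟩
      · intro y hy
        rcases (List.mem_append.mp hy) with h | h
        · exact hb y h
        · simp only [List.mem_singleton] at h; subst h; exact hx2
      · rw [List.find?_append, hf]
        obtain ⟨y, hy, hgy⟩ := hatt
        cases hfind : l.find? (fun y => decide (g y = r0.2)) with
        | some a => simp
        | none =>
          exact absurd (List.find?_eq_none.mp hfind y hy) (by simp [hgy])
      · obtain ⟨y, hy, hgy⟩ := hatt
        exact ⟨y, by simp [hy], hgy⟩

-- find? with pointwise-equal predicates on the members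
lemma find?_congr_mem (l : List Int) (p q : Int → Bool) (h : ∀ a ∈ l, p a = q a) :
    l.find? p = l.find? q := by
  induction l with
  | nil => rfl
  | cons a t ih =>
    simp only [List.find?]
    rw [h a (by simp)]
    cases q a <;> simp [ih (fun b hb => h b (by simp [hb]))]

-- ===== VERDICT (by name: the statement is the Claim_ definition above) =====
theorem f_spec : Claim_equal_f := by
  unfold Claim_equal_f
  intro dice _
  unfold Spec_f f f_alt
  set g : Int → Int := fun x => ((dice.count x : Nat) : Int) with hg
  have hpos : ∀ x ∈ dice, 0 < g x := by
    intro x hx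
    simp only [hg]
    exact_mod_cast List.count_pos_iff.mpr hx
  set r := dice.foldl (fun st x => if st.2 < g x then (some x, g x) else st)
      ((none : Option Int), (0 : Int)) with hr
  obtain ⟨hb, hf, ha⟩ := foldB_inv g dice hpos r hr
  -- A's side: rewrite the dict as Counter and the scan as a find? over the dedup keys
  have hitems : (fDict dice).items =
      (PySem.Set.ofList dice).map (fun k => (k, g k)) := by
    rw [fDict_eq_counter]; exact PySem.Dict.items_counter dice
  have hvals : (fDict dice).values = (PySem.Set.ofList dice).map g := by
    have : (fDict dice).values = (fDict dice).items.map (·.2) := rfl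
    rw [this, hitems, List.map_map]; rfl
  rw [hitems, hvals, fScan_map, find?_ofList]
  -- B's side is literally the fold of the invariant
  have hB : (dice.foldl
      (fun st x =>
        let c : Int := (dice.count x : Int)
        if st.2 < c then (some x, c) else st)
      ((none : Option Int), (0 : Int))).1 = r.1 := rfl
  rw [hB, hf]
  -- the two predicates agree on members of dice
  apply find?_congr_mem
  intro a hamem
  have hne : (PySem.Set.ofList dice).map g ≠ [] := by
    have hmemset : a ∈ PySem.Set.ofList dice := (PySem.Set.mem_ofList dice a).mpr hamem
    intro hnil
    rcases List.map_eq_nil_iff.mp hnil with h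
    simp [h] at hmemset
  obtain ⟨m, hm⟩ : ∃ m, PySem.List.max? ((PySem.Set.ofList dice).map g) id = some m := by
    cases hmax : PySem.List.max? ((PySem.Set.ofList dice).map g) id with
    | none => exact absurd ((PySem.List.max?_eq_none_iff _ id).mp hmax) hne
    | some m => exact ⟨m, rfl⟩
  -- m = r.2
  have hmem : m ∈ (PySem.Set.ofList dice).map g := PySem.List.max?_mem hm
  obtain ⟨k, hk, hkm⟩ := List.mem_map.mp hmem
  have hkd : k ∈ dice := (PySem.Set.mem_ofList dice k).mp hk
  have hmr : m ≤ r.2 := hkm ▸ hb k hkd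
  have hrm : r.2 ≤ m := by
    have hr2pos : 0 < r.2 := lt_of_lt_of_le (hpos a hamem) (hb a hamem)
    rcases ha with h0 | ⟨y, hy, hgy⟩
    · omega
    · have : g y ∈ (PySem.Set.ofList dice).map g :=
        List.mem_map.mpr ⟨y, (PySem.Set.mem_ofList dice y).mpr hy, rfl⟩
      have := PySem.List.max?_isMax hm (g y) this
      simpa [hgy] using this
  have hmeq : m = r.2 := le_antisymm hmr hrm
  rw [hm]
  simp [hmeq]
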